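/- GENERATED by c/gen_decode.py: decode facts of the image, one per distinct instruction byte string. -/
import UserX.DecodeImage

#decode_all Vorbis.Dec
  "01f0"  -- add eax,esi
  "0f8401020000"  -- je 114892
  "0f84d3000000"  -- je 1144d7
  "0f872c040000"  -- ja 114b7f
  "0f8eb0000000"  -- jle 116471
  "0fb6542418"  -- movzx edx,BYTE PTR [rsp+0x18]
  "2b8398000000"  -- sub eax,DWORD PTR [rbx+0x98]
  "4101ec"  -- add r12d,ebp
  "41396f10"  -- cmp DWORD PTR [r15+0x10],ebp
  "4183fc01"  -- cmp r12d,0x1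
  "4189f7"  -- mov r15d,esi
  "41bfff7f0000"  -- mov r15d,0x7fff
  "42889c24a0000000"  -- mov BYTE PTR [rsp+r12*1+0xa0],bl
  "4439642418"  -- cmp DWORD PTR [rsp+0x18],r12d
  "4489630c"  -- mov DWORD PTR [rbx+0xc],r12d
  "4489cb"  -- mov ebx,r9d
  "448b75f8"  -- mov r14d,DWORD PTR [rbp-0x8]
  "450fb6fc"  -- movzx r15d,r12b
  "4589ec"  -- mov r12d,r13d
  "4688bc3346030000"  -- mov BYTE PTR [rbx+r14*1+0x346],r15b
  "4863442430"  -- movsxd rax,DWORD PTR [rsp+0x30]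
  "4881c4c8070000"  -- add rsp,0x7c8
  "4883fe07"  -- cmp rsi,0x7
  "4889c1"  -- mov rcx,rax
  "488b542420"  -- mov rdx,QWORD PTR [rsp+0x20]
  "488bbd50ffffff"  -- mov rdi,QWORD PTR [rbp-0xb0]
  "488d742440"  -- lea rsi,[rsp+0x40]
  "488d7dec"  -- lea rdi,[rbp-0x14]
  "488dbbd0010000"  -- lea rdi,[rbx+0x1d0]
  "488dbde8040000"  -- lea rdi,[rbp+0x4e8]
  "48c7800000c00000000000"  -- mov QWORD PTR [rax+0xc00000],0x0
  "4939f0"  -- cmp r8,rsi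
  "4989d6"  -- mov r14,rdx
  "498d7c241b"  -- lea rdi,[r12+0x1b]
  "498dbe40080000"  -- lea rdi,[r14+0x840]
  "4a8d7c3341"  -- lea rdi,[rbx+r14*1+0x41]
  "4c03a538080000"  -- add r12,QWORD PTR [rbp+0x838]
  "4c89add8010000"  -- mov QWORD PTR [rbp+0x1d8],r13
  "4c8b7c2428"  -- mov r15,QWORD PTR [rsp+0x28]
  "4c8dadae000000"  -- lea r13,[rbp+0xae]
  "4d89fe"  -- mov r14,r15
  "660f28c5"  -- movapd xmm0,xmm5
  "66410f6edd"  -- movd xmm3,r13d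
  "66480f7ec3"  -- movq rbx,xmm0
  "7418"  -- je 100263
  "74f0"  -- je 101daa
  "771d"  -- ja 1025f8
  "7e02"  -- jle 104e59
  "7fa5"  -- jg 115b38
  "837c247800"  -- cmp DWORD PTR [rsp+0x78],0x0
  "85d2"  -- test edx,edx
  "896c2404"  -- mov DWORD PTR [rsp+0x4],ebp
  "89e8"  -- mov eax,ebp
  "8b542428"  -- mov edx,DWORD PTR [rsp+0x28]
  "8b8be8060000"  -- mov ecx,DWORD PTR [rbx+0x6e8]
  "b802000000"  -- mov eax,0x2
  "c1e603"  -- shl esi,0x3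
  "c7805801c000f3f3f3f3"  -- mov DWORD PTR [rax+0xc00158],0xf3f3f3f3
  "d3e5"  -- shl ebp,cl
  "e808f3feff"  -- call 100800
  "e812c4feff"  -- call 1008e0
  "e81c53ffff"  -- call 100800
  "e826bfffff"  -- call 105740
  "e82f0bffff"  -- call 100300
  "e83988ffff"  -- call 1008e0
  "e844fbffff"  -- call 107500
  "e84ec1ffff"  -- call 100300
  "e85a77ffff"  -- call 10d1c0
  "e868d3ffff"  -- call 100720
  "e8739cffff"  -- call 100640
  "e87dfaffff"  -- call 1066c0
  "e8898fffff"  -- call 1016e0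
  "e89326ffff"  -- call 100300
  "e89d15ffff"  -- call 100640
  "e8a7abfeff"  -- call 100640
  "e8b19affff"  -- call 100640
  "e8bb79ffff"  -- call 103d00
  "e8c5b9ffff"  -- call 100800
  "e8cfb8ffff"  -- call 100480
  "e8da10ffff"  -- call 100800
  "e8e3a6feff"  -- call 100720
  "e8ec6efeff"  -- call 100720
  "e8f652ffff"  -- call 100800
  "e905ffffff"  -- jmp 10ed16
  "e947ffffff"  -- jmp 10d626
  "e99c000000"  -- jmp 1076f9
  "e9ecf3ffff"  -- jmp 10eed9
  "eb6d"  -- jmp 10c103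
  "ebdc"  -- jmp 108fe1
  "f20f5805a3d70100"  -- addsd xmm0,QWORD PTR [rip+0x1d7a3]
  "f20f5e152ce00100"  -- divsd xmm2,QWORD PTR [rip+0x1e02c]
  "f30f104db8"  -- movss xmm1,DWORD PTR [rbp-0x48]
  "f30f10742404"  -- movss xmm6,DWORD PTR [rsp+0x4]
  "f30f114df4"  -- movss DWORD PTR [rbp-0xc],xmm1
  "f30f11742418"  -- movss DWORD PTR [rsp+0x18],xmm6
  "f30f58d5"  -- addss xmm2,xmm5
  "f30f59e0"  -- mulss xmm4,xmm0
  "f3410f1016"  -- movss xmm2,DWORD PTR [r14]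
  "f3410f584610"  -- addss xmm0,DWORD PTR [r14+0x10]
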